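-- pv_equiv track=rewrite | github.com/jeffrey82221/jsonschema_inference | common/schema/inference/base.py | _batchwise_generator
-- ===== SOURCE A (Python) =====
-- def _batchwise_generator(gen, batch_size=100):
--     batch = []
--     for i, element in enumerate(gen):
--         batch.append(element)
--         if i % batch_size == (batch_size - 1):
--             yield batch
--             del batch
--             batch = []
--     if batch:
--         yield batch
-- ===== SOURCE B (Python) =====
-- def _batchwise_generator(gen, batch_size=100):
--     it = iter(gen)
--     while True:
--         batch = []
--         for _ in range(batch_size):
--             try:
--                 batch.append(next(it))
--             except StopIteration:
--                 break
--         if not batch: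
--             return
--         yield batch
-- ===== Notes on version B (the rewrite author's own statement) =====
-- stated objective: idiomatic
-- what changed: B pulls each fixed-size chunk directly from the iterator and stops on an empty chunk, instead of enumerating elements into a buffer flushed on a modulo-counter test with a trailing-remainder flush.
-- outside the precondition, e.g. on _batchwise_generator([1], -1): A returns [[1]], B returns []
import Mathlib
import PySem

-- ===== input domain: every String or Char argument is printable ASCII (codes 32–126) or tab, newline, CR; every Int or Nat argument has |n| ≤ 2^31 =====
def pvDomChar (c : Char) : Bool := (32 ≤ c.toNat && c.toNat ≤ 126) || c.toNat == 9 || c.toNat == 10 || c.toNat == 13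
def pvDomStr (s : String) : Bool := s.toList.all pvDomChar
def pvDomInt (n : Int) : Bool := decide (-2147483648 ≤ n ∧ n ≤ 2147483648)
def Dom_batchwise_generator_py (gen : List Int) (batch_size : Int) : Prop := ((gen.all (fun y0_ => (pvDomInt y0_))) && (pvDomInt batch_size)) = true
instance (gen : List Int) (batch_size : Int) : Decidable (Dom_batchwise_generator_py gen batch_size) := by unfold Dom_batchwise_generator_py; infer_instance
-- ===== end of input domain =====

-- B pulls fixed-size chunks directly from the iterator instead of A's modulo-counter flush loop: idiomatic, same O(n) cost; equivalence of RETURN values (both are generators; yielded batches compared as lists).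


-- ===== PORT A =====
-- the for-loop over enumerate(gen): state = (accumulated yields, current batch), index i
def batchwiseLoopA (bs : Int) : List Int → Int → List (List Int) → List Int → List (List Int)
  | [], _, acc, batch => if batch ≠ [] then acc ++ [batch] else acc
  | e :: rest, i, acc, batch =>
      let batch' := batch ++ [e]
      if PySem.Int.mod i bs = bs - 1 then
        batchwiseLoopA bs rest (i + 1) (acc ++ [batch']) []
      else
        batchwiseLoopA bs rest (i + 1) acc batch'

def batchwise_generator_py (gen : List Int) (batch_size : Int) : List (List Int) :=
  batchwiseLoopA batch_size gen 0 [] []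

-- ===== PORT B =====
-- while True: collect up to batch_size elements from the iterator; stop on an empty chunk
def batchwise_generator_py_alt (gen : List Int) (batch_size : Int) : List (List Int) :=
  if h : gen.take batch_size.toNat = [] then [] -- stop on empty chunk
  else gen.take batch_size.toNat :: batchwise_generator_py_alt (gen.drop batch_size.toNat) batch_size
termination_by gen.length
decreasing_by
  simp only [List.take_eq_nil_iff, not_or] at h
  cases gen with
  | nil => exact absurd rfl h.2
  | cons a t => simp [List.length_drop]; omega

-- ===== PRECONDITION & SPEC =====
-- Pre_ excludes non-positive batch sizes (keeping the trivial gen = [] with batch_size = 0 case):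
-- for batch_size = 0 on nonempty input A raises ZeroDivisionError, and for negative batch_size the
-- modulo test never fires so A accidentally returns the whole input as one unbounded batch while B
-- yields nothing — a corner no caller would specify either way.
def Pre_batchwise_generator_py (gen : List Int) (batch_size : Int) : Prop :=
  1 ≤ batch_size ∨ (gen = [] ∧ batch_size = 0)
instance (gen : List Int) (batch_size : Int) : Decidable (Pre_batchwise_generator_py gen batch_size) := by unfold Pre_batchwise_generator_py; infer_instance

def pvWitness_batchwise_generator_py : List Int × Int := ([1, 2, 3, 4, 5], 2)

def Spec_batchwise_generator_py (gen : List Int) (batch_size : Int) (out : List (List Int)) : Prop := out = batchwise_generator_py_alt gen batch_size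
instance (gen : List Int) (batch_size : Int) (out : List (List Int)) : Decidable (Spec_batchwise_generator_py gen batch_size out) := by unfold Spec_batchwise_generator_py; infer_instance

-- ===== CLAIM (what is proved, stated in full; the proofs are below) =====
def Claim_equal_batchwise_generator_py : Prop := ∀ (gen : List Int) (batch_size : Int), Dom_batchwise_generator_py gen batch_size → Pre_batchwise_generator_py gen batch_size → Spec_batchwise_generator_py gen batch_size (batchwise_generator_py gen batch_size)

-- ===== LEMMAS AND PROOFS =====

-- unfolding lemma for B's well-founded recursion, in chunk form
theorem alt_cons (bs : Int) (xs rest : List Int) (hx : xs ≠ []) (hlen : xs.length = bs.toNat) :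
    batchwise_generator_py_alt (xs ++ rest) bs = xs :: batchwise_generator_py_alt rest bs := by
  have htake : (xs ++ rest).take bs.toNat = xs := by rw [← hlen, List.take_left]
  have hdrop : (xs ++ rest).drop bs.toNat = rest := by rw [← hlen, List.drop_left]
  rw [batchwise_generator_py_alt, dif_neg (by simp [htake, hx]), htake, hdrop]

theorem alt_nil (bs : Int) : batchwise_generator_py_alt [] bs = [] := by
  rw [batchwise_generator_py_alt]; simp

theorem alt_short (bs : Int) (xs : List Int) (hx : xs ≠ []) (hlen : xs.length ≤ bs.toNat) :
    batchwise_generator_py_alt xs bs = [xs] := by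
  have htake : xs.take bs.toNat = xs := List.take_of_length_le hlen
  have hdrop : xs.drop bs.toNat = [] := List.drop_eq_nil_of_le hlen
  rw [batchwise_generator_py_alt, dif_neg (by simp [htake, hx]), htake, hdrop, alt_nil]

-- main invariant: when the current batch has length i % bs (Python mod, bs ≥ 1),
-- the rest of A's loop produces acc ++ (B applied to batch ++ remaining input)
theorem batchwiseLoopA_eq_alt (bs : Int) (hbs : 1 ≤ bs) :
    ∀ (gen : List Int) (i : Int) (acc : List (List Int)) (batch : List Int),
      PySem.Int.mod i bs = (batch.length : Int) →
      batchwiseLoopA bs gen i acc batch = acc ++ batchwise_generator_py_alt (batch ++ gen) bs := by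
  have hpos : (0 : Int) < bs := by omega
  intro gen
  induction gen with
  | nil =>
    intro i acc batch hinv
    rw [PySem.Int.mod_eq_emod_of_pos hpos] at hinv
    have hlt : (batch.length : Int) < bs := hinv ▸ Int.emod_lt_of_pos i hpos
    cases hb : batch with
    | nil => simp [batchwiseLoopA, alt_nil]
    | cons x t =>
      rw [← hb, List.append_nil]
      rw [alt_short bs batch (by simp [hb]) (by omega)]
      simp [batchwiseLoopA, hb]
  | cons e rest ih =>
    intro i acc batch hinv
    rw [PySem.Int.mod_eq_emod_of_pos hpos] at hinv
    have hlt : (batch.length : Int) < bs := hinv ▸ Int.emod_lt_of_pos i hpos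
    have hstep : i + 1 = ((batch.length : Int) + 1) + bs * (i / bs) := by
      have := Int.emod_add_mul_ediv i bs; omega
    by_cases hfl : (i % bs : Int) = bs - 1
    · -- flush: batch ++ [e] has length bs and is exactly the next chunk
      have hcond : PySem.Int.mod i bs = bs - 1 := by
        rw [PySem.Int.mod_eq_emod_of_pos hpos]; exact hfl
      have hlen : (batch.length : Int) = bs - 1 := by rw [← hinv, hfl]
      have hmod1 : PySem.Int.mod (i + 1) bs = ((([] : List Int).length : Nat) : Int) := by
        rw [PySem.Int.mod_eq_emod_of_pos hpos, hstep, Int.add_mul_emod_self_left, hlen]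
        simp
      simp only [batchwiseLoopA]
      rw [if_pos hcond, ih (i + 1) (acc ++ [batch ++ [e]]) [] hmod1]
      have hassoc : batch ++ e :: rest = (batch ++ [e]) ++ rest := by simp
      rw [hassoc, alt_cons bs (batch ++ [e]) rest (by simp) (by simp; omega)]
      simp
    · -- no flush: extend the batch, the chunking of batch ++ e :: rest is unchanged
      have hcond : ¬ PySem.Int.mod i bs = bs - 1 := by
        rw [PySem.Int.mod_eq_emod_of_pos hpos]; exact hfl
      have hlt' : (batch.length : Int) + 1 < bs := by
        rcases lt_or_eq_of_le (show (batch.length : Int) + 1 ≤ bs by omega) with h | h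
        · exact h
        · exact absurd (by rw [hinv]; omega) hfl
      have hmod1 : PySem.Int.mod (i + 1) bs = (((batch ++ [e]).length : Nat) : Int) := by
        rw [PySem.Int.mod_eq_emod_of_pos hpos, hstep, Int.add_mul_emod_self_left,
          Int.emod_eq_of_lt (by positivity) (by omega)]
        simp
      simp only [batchwiseLoopA]
      rw [if_neg hcond, ih (i + 1) acc (batch ++ [e]) hmod1]
      simp

-- ===== VERDICT (by name: the statement is the Claim_ definition above) =====
theorem batchwise_generator_py_spec : Claim_equal_batchwise_generator_py := by
  intro gen bs _ hpre
  unfold Spec_batchwise_generator_py batchwise_generator_py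
  rcases hpre with hbs | ⟨hg, hbs⟩
  · have := batchwiseLoopA_eq_alt bs hbs gen 0 [] []
      (by rw [PySem.Int.mod_eq_emod_of_pos (by omega)]; simp)
    simpa using this
  · subst hg; subst hbs
    rw [alt_nil]; simp [batchwiseLoopA]
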